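-- pv_equiv track=rewrite | github.com/PFasano99/RL_test_ground | maze_generator.py | find_non_zero_coordinates
-- ===== SOURCE A (Python) =====
-- def find_non_zero_coordinates(maze, start_char = 3, finish_char = 4):
--     coordinates = []
--     start_coord = []
--     finish_coord = []
--     for i, row in enumerate(maze):
--         for j, value in enumerate(row):
--             if value != 0:
--                 coordinates.append([i, j])
--                 if value == start_char:
--                     start_coord = [i,j]
--                 elif value == finish_char:
--                     finish_coord = [i,j]
--     return coordinates, start_coord, finish_coord
-- ===== SOURCE B (Python) =====
-- def _last_pos(maze, ch):
--     pos = []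
--     for i, row in enumerate(maze):
--         for j, value in enumerate(row):
--             if value == ch:
--                 pos = [i, j]
--     return pos
--
-- def find_non_zero_coordinates(maze, start_char=3, finish_char=4):
--     coordinates = [[i, j] for i, row in enumerate(maze)
--                    for j, value in enumerate(row) if value != 0]
--     return coordinates, _last_pos(maze, start_char), _last_pos(maze, finish_char)
-- ===== Notes on version B (the rewrite author's own statement) =====
-- stated objective: simpler
-- what changed: A's single fused nested scan with three mutable accumulators becomes a flat comprehension collecting the non-zero coordinates plus a reusable last-occurrence helper called once for each marker; Pre_ excludes only the degenerate marker choices that actually occur in the maze (a marker equal to 0 while some cell is 0, or equal markers present), where A's non-zero gate and elif shadowing give one accidental answer and an independent last-occurrence scan gives another, both defensible for unspecified markers.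
-- outside the precondition, e.g. on find_non_zero_coordinates([[0, 1]], 0, 4): A returns ([[0, 1]], [], []), B returns ([[0, 1]], [0, 0], []); on find_non_zero_coordinates([[3]], 3, 3): A returns ([[0, 0]], [0, 0], []), B returns ([[0, 0]], [0, 0], [0, 0])
import Mathlib
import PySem

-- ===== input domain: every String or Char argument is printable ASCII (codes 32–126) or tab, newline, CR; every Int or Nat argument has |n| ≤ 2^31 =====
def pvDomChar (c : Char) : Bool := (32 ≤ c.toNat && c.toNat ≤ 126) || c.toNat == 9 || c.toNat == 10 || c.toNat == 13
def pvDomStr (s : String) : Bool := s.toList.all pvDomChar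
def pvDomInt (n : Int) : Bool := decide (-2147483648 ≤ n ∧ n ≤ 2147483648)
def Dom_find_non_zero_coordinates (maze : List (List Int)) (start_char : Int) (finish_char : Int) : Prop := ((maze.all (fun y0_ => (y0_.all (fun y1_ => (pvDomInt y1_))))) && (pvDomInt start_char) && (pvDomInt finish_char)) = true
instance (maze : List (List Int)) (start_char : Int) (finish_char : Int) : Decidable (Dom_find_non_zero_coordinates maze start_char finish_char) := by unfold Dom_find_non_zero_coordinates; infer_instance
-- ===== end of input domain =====

-- B replaces A's single fused nested scan by a collect-then-locate decomposition: a flat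
-- comprehension for the coordinates plus an independent last-occurrence scan per marker
-- (objective: simpler); Pre_ excludes the degenerate marker choices where both answers are defensible.

-- ===== PORT A =====
-- literal transliteration of A's fused nested loop over one (coords, start, finish) state
def find_non_zero_coordinates (maze : List (List Int)) (start_char : Int) (finish_char : Int) : List (List Int) × List Int × List Int :=
  (PySem.List.enumerate maze).foldl (fun acc p =>
    (PySem.List.enumerate p.2).foldl (fun acc2 q =>
      if q.2 ≠ 0 then
        if q.2 = start_char then (acc2.1 ++ [[p.1, q.1]], [p.1, q.1], acc2.2.2)
        else if q.2 = finish_char then (acc2.1 ++ [[p.1, q.1]], acc2.2.1, [p.1, q.1])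
        else (acc2.1 ++ [[p.1, q.1]], acc2.2.1, acc2.2.2)
      else acc2) acc)
    (([] : List (List Int)), ([] : List Int), ([] : List Int))

-- ===== PORT B =====
-- B's helper: last [i, j] with maze[i][j] == ch, or [] if none
def pvLastPos (maze : List (List Int)) (ch : Int) : List Int :=
  (PySem.List.enumerate maze).foldl (fun pos p =>
    (PySem.List.enumerate p.2).foldl (fun pos2 q =>
      if q.2 = ch then [p.1, q.1] else pos2) pos) []

def find_non_zero_coordinates_alt (maze : List (List Int)) (start_char : Int) (finish_char : Int) : List (List Int) × List Int × List Int :=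
  ((PySem.List.enumerate maze).flatMap (fun p =>
      ((PySem.List.enumerate p.2).filter (fun q => q.2 ≠ 0)).map (fun q => [p.1, q.1])),
   pvLastPos maze start_char,
   pvLastPos maze finish_char)

-- ===== PRECONDITION & SPEC =====
-- Pre_ excludes only the degenerate marker choices that actually occur in the maze (a marker
-- equal to 0 while some cell is 0, or the two markers equal and present), on which A's
-- non-zero gate / elif shadowing and B's independent last-occurrence scans give different,
-- equally defensible answers for an unspecified corner.
def Pre_find_non_zero_coordinates (maze : List (List Int)) (start_char : Int) (finish_char : Int) : Prop :=
  ((start_char = 0 ∨ finish_char = 0) → ∀ row ∈ maze, (0 : Int) ∉ row) ∧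
  ((start_char = finish_char ∧ start_char ≠ 0) → ∀ row ∈ maze, start_char ∉ row)
instance (maze : List (List Int)) (start_char : Int) (finish_char : Int) : Decidable (Pre_find_non_zero_coordinates maze start_char finish_char) := by unfold Pre_find_non_zero_coordinates; infer_instance

def pvWitness_find_non_zero_coordinates : List (List Int) × Int × Int := ([[1, 3], [4, 0]], 3, 4)

def Spec_find_non_zero_coordinates (maze : List (List Int)) (start_char : Int) (finish_char : Int) (out : List (List Int) × List Int × List Int) : Prop := out = find_non_zero_coordinates_alt maze start_char finish_char
instance (maze : List (List Int)) (start_char : Int) (finish_char : Int) (out : List (List Int) × List Int × List Int) : Decidable (Spec_find_non_zero_coordinates maze start_char finish_char out) := by unfold Spec_find_non_zero_coordinates; infer_instance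

-- ===== CLAIM (what is proved, stated in full; the proofs are below) =====
def Claim_equal_find_non_zero_coordinates : Prop := ∀ (maze : List (List Int)) (start_char : Int) (finish_char : Int), Dom_find_non_zero_coordinates maze start_char finish_char → Pre_find_non_zero_coordinates maze start_char finish_char → Spec_find_non_zero_coordinates maze start_char finish_char (find_non_zero_coordinates maze start_char finish_char)

-- ===== LEMMAS AND PROOFS =====

-- A's inner per-row loop, decomposed componentwise into B's pieces.
theorem pv_inner (s f : Int) : ∀ (cells : List (Int × Int)) (i : Int)
    (c : List (List Int)) (st fi : List Int),
    cells.foldl (fun acc2 q =>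
      if q.2 ≠ 0 then
        if q.2 = s then (acc2.1 ++ [[i, q.1]], [i, q.1], acc2.2.2)
        else if q.2 = f then (acc2.1 ++ [[i, q.1]], acc2.2.1, [i, q.1])
        else (acc2.1 ++ [[i, q.1]], acc2.2.1, acc2.2.2)
      else acc2) (c, st, fi)
    = (c ++ (cells.filter (fun q => q.2 ≠ 0)).map (fun q => [i, q.1]),
       if s ≠ 0 then cells.foldl (fun p2 q => if q.2 = s then [i, q.1] else p2) st else st,
       if f ≠ 0 ∧ f ≠ s then cells.foldl (fun p2 q => if q.2 = f then [i, q.1] else p2) fi else fi) := by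
  intro cells
  induction cells with
  | nil => intro i c st fi; simp
  | cons q rest ih =>
    intro i c st fi
    simp only [List.foldl_cons, List.filter_cons]
    by_cases hz : q.2 = 0
    · rw [if_neg (fun h => h hz), if_neg (by simp [hz]), ih]
      refine Prod.ext ?_ (Prod.ext ?_ ?_) <;> dsimp only
      · by_cases h1 : s ≠ 0
        · rw [if_pos h1, if_pos h1, if_neg (by omega)]
        · rw [if_neg h1, if_neg h1]
      · by_cases h1 : f ≠ 0 ∧ f ≠ s
        · obtain ⟨h2, h3⟩ := h1
          rw [if_pos ⟨h2, h3⟩, if_pos ⟨h2, h3⟩, if_neg (by omega)]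
        · rw [if_neg h1, if_neg h1]
    · by_cases hs : q.2 = s
      · rw [if_pos hz, if_pos hs, if_pos (by simp [hz]), ih]
        have hsne : s ≠ 0 := by omega
        refine Prod.ext ?_ (Prod.ext ?_ ?_) <;> dsimp only
        · simp [List.append_assoc]
        · rw [if_pos hsne, if_pos hsne, if_pos hs]
        · by_cases h1 : f ≠ 0 ∧ f ≠ s
          · obtain ⟨h2, h3⟩ := h1
            rw [if_pos ⟨h2, h3⟩, if_pos ⟨h2, h3⟩, if_neg (by omega)]
          · rw [if_neg h1, if_neg h1]
      · by_cases hf : q.2 = f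
        · rw [if_pos hz, if_neg hs, if_pos hf, if_pos (by simp [hz]), ih]
          have hg : f ≠ 0 ∧ f ≠ s := ⟨by omega, by omega⟩
          refine Prod.ext ?_ (Prod.ext ?_ ?_) <;> dsimp only
          · simp [List.append_assoc]
          · by_cases h1 : s ≠ 0
            · rw [if_pos h1, if_pos h1, if_neg hs]
            · rw [if_neg h1, if_neg h1]
          · rw [if_pos hg, if_pos hg, if_pos hf]
        · rw [if_pos hz, if_neg hs, if_neg hf, if_pos (by simp [hz]), ih]
          refine Prod.ext ?_ (Prod.ext ?_ ?_) <;> dsimp only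
          · simp [List.append_assoc]
          · by_cases h1 : s ≠ 0
            · rw [if_pos h1, if_pos h1, if_neg hs]
            · rw [if_neg h1, if_neg h1]
          · by_cases h1 : f ≠ 0 ∧ f ≠ s
            · obtain ⟨h2, h3⟩ := h1
              rw [if_pos ⟨h2, h3⟩, if_pos ⟨h2, h3⟩, if_neg hf]
            · rw [if_neg h1, if_neg h1]

-- A's outer loop, over an arbitrary enumerated row list and accumulator.
theorem pv_outer (s f : Int) : ∀ (rows : List (Int × List Int))
    (c : List (List Int)) (st fi : List Int),
    rows.foldl (fun acc p =>
      (PySem.List.enumerate p.2).foldl (fun acc2 q =>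
        if q.2 ≠ 0 then
          if q.2 = s then (acc2.1 ++ [[p.1, q.1]], [p.1, q.1], acc2.2.2)
          else if q.2 = f then (acc2.1 ++ [[p.1, q.1]], acc2.2.1, [p.1, q.1])
          else (acc2.1 ++ [[p.1, q.1]], acc2.2.1, acc2.2.2)
        else acc2) acc) (c, st, fi)
    = (c ++ rows.flatMap (fun p =>
         ((PySem.List.enumerate p.2).filter (fun q => q.2 ≠ 0)).map (fun q => [p.1, q.1])),
       if s ≠ 0 then rows.foldl (fun pos p =>
         (PySem.List.enumerate p.2).foldl (fun p2 q => if q.2 = s then [p.1, q.1] else p2) pos) st else st,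
       if f ≠ 0 ∧ f ≠ s then rows.foldl (fun pos p =>
         (PySem.List.enumerate p.2).foldl (fun p2 q => if q.2 = f then [p.1, q.1] else p2) pos) fi else fi) := by
  intro rows
  induction rows with
  | nil => intro c st fi; simp
  | cons p rest ih =>
    intro c st fi
    simp only [List.foldl_cons, List.flatMap_cons]
    rw [pv_inner s f, ih]
    refine Prod.ext (by rw [List.append_assoc]) (Prod.ext ?_ ?_) <;>
      split_ifs with h1 <;> rfl

-- a last-occurrence scan over cells none of which carries the sought value returns its initial state
theorem pv_inner_nomatch (ch i : Int) : ∀ (cells : List (Int × Int)) (st : List Int),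
    (∀ q ∈ cells, q.2 ≠ ch) →
    cells.foldl (fun p2 q => if q.2 = ch then [i, q.1] else p2) st = st := by
  intro cells
  induction cells with
  | nil => intro st _; rfl
  | cons q rest ih =>
    intro st h
    simp only [List.foldl_cons, if_neg (h q (List.mem_cons_self))]
    exact ih st (fun r hr => h r (List.mem_cons_of_mem _ hr))

theorem pv_outer_nomatch (ch : Int) : ∀ (rows : List (Int × List Int)) (st : List Int),
    (∀ p ∈ rows, ∀ v ∈ p.2, v ≠ ch) →
    rows.foldl (fun pos p =>
      (PySem.List.enumerate p.2).foldl (fun p2 q => if q.2 = ch then [p.1, q.1] else p2) pos) st = st := by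
  intro rows
  induction rows with
  | nil => intro st _; rfl
  | cons p rest ih =>
    intro st h
    simp only [List.foldl_cons]
    rw [pv_inner_nomatch ch p.1 _ st (fun q hq => by
      obtain ⟨k, hk, rfl⟩ := (PySem.List.mem_enumerate_iff _ _ _).1 hq
      exact h p (List.mem_cons_self) _ (List.getElem_mem hk))]
    exact ih st (fun r hr => h r (List.mem_cons_of_mem _ hr))

-- if ch occurs in no row, B's last-occurrence helper returns []
theorem pvLastPos_nomatch (maze : List (List Int)) (ch : Int)
    (h : ∀ row ∈ maze, ch ∉ row) : pvLastPos maze ch = [] := by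
  unfold pvLastPos
  exact pv_outer_nomatch ch _ [] (fun p hp v hv hveq => by
    obtain ⟨k, hk, rfl⟩ := (PySem.List.mem_enumerate_iff _ _ _).1 hp
    exact h _ (List.getElem_mem hk) (hveq ▸ hv))

-- ===== VERDICT (by name: the statement is the Claim_ definition above) =====
theorem find_non_zero_coordinates_spec : Claim_equal_find_non_zero_coordinates := by
  intro maze s f _ hpre
  obtain ⟨h0, heq⟩ := hpre
  show find_non_zero_coordinates maze s f = find_non_zero_coordinates_alt maze s f
  unfold find_non_zero_coordinates find_non_zero_coordinates_alt
  rw [pv_outer s f]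
  refine Prod.ext (by simp) (Prod.ext ?_ ?_) <;> dsimp only
  · by_cases hs : s ≠ 0
    · rw [if_pos hs]; rfl
    · push_neg at hs
      rw [if_neg (by omega), pvLastPos_nomatch maze s (hs ▸ h0 (Or.inl hs))]
  · by_cases hf : f ≠ 0 ∧ f ≠ s
    · rw [if_pos hf]; rfl
    · rw [if_neg hf]
      rcases Decidable.not_and_iff_not_or_not.1 hf with hf0 | hfs
      · push_neg at hf0
        rw [pvLastPos_nomatch maze f (hf0 ▸ h0 (Or.inr hf0))]
      · push_neg at hfs
        by_cases hz : f = 0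
        · rw [pvLastPos_nomatch maze f (hz ▸ h0 (Or.inr hz))]
        · rw [pvLastPos_nomatch maze f (hfs ▸ heq ⟨hfs.symm, hfs ▸ hz⟩)]
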